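-- pv_equiv track=rewrite | github.com/alanprymon/Basic-Security-Device | Python/device.py | only_number
-- ===== SOURCE A (Python) =====
-- def only_number(check):
--     checked = check
--     if not check.isdecimal():
--         # remove every character that is not a decimal (0-9)
--
--         delete = set()
--         for x in check:
--             if not x.isdecimal():
--                 delete.add(x)
--         for x in delete:
--             checked = checked.replace(x, "")
--         delete.clear()
--     return checked
-- ===== SOURCE B (Python) =====
-- def only_number(check):
--     # single pass: keep exactly the decimal characters, in order
--     return "".join(c for c in check if c.isdecimal())
-- ===== Notes on version B (the rewrite author's own statement) =====
-- stated objective: idiomatic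
-- what changed: Replaces A's two-phase scheme (collect the distinct non-decimal characters into a set, then run one full-string replace pass per bad character) with a single filtering pass that joins the decimal characters directly.
import Mathlib
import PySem

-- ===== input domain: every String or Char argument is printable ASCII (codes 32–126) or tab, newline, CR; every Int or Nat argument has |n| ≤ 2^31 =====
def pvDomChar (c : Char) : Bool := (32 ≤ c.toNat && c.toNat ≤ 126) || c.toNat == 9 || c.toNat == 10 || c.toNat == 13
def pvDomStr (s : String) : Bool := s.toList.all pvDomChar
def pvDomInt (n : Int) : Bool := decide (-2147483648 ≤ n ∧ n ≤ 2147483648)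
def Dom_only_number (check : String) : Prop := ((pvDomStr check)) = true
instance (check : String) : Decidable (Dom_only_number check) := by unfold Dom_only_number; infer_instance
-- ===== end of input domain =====

-- B is a single filtering pass instead of A's set-of-bad-chars plus one replace pass per bad char (idiomatic).
-- On the printable-ASCII domain str.isdecimal coincides with PySem.Chars.isdigit ('0'-'9'): both ports use it.

-- ===== PORT A =====
def only_number (check : String) : String :=
  let checked := check
  if ¬ PySem.Str.strIsdigit check then
    -- delete = set(); for x in check: if not x.isdecimal(): delete.add(x)
    let delete : PySem.Set Char :=
      check.toList.foldl
        (fun s x => if ¬ PySem.Chars.isdigit x then PySem.Set.add s x else s)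
        PySem.Set.empty
    -- for x in delete: checked = checked.replace(x, "")  (order-independent: distinct chars removed)
    delete.foldl (fun checked x => PySem.Str.replace checked (String.ofList [x]) "") checked
  else
    checked

-- ===== PORT B =====
-- "".join(c for c in check if c.isdecimal())
def only_number_alt (check : String) : String :=
  String.ofList (check.toList.filter PySem.Chars.isdigit)

-- ===== PRECONDITION & SPEC =====
def Spec_only_number (check : String) (out : String) : Prop := out = only_number_alt check
instance (check : String) (out : String) : Decidable (Spec_only_number check out) := by unfold Spec_only_number; infer_instance

-- ===== CLAIM (what is proved, stated in full; the proofs are below) =====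
def Claim_equal_only_number : Prop := ∀ (check : String), Dom_only_number check → Spec_only_number check (only_number check)

-- ===== LEMMAS AND PROOFS =====

-- replace.go with a single-character pattern and empty replacement filters that character out
theorem pv_go_single (x : Char) : ∀ (fuel : Nat) (l acc : List Char), l.length ≤ fuel →
    PySem.Chars.replace.go [x] [] fuel l acc = acc.reverse ++ l.filter (fun c => !(c == x)) := by
  intro fuel
  induction fuel with
  | zero =>
    intro l acc h
    have : l = [] := List.eq_nil_of_length_eq_zero (Nat.le_zero.mp h)
    subst this
    simp [PySem.Chars.replace.go]
  | succ n ih =>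
    intro l acc h
    cases l with
    | nil => simp [PySem.Chars.replace.go]
    | cons c t =>
      rw [PySem.Chars.replace.go.eq_def]
      by_cases hc : c = x
      · subst hc
        have hpre : [c].isPrefixOf (c :: t) = true := by simp [List.isPrefixOf]
        simp only [hpre, if_pos, List.length_cons, List.length_nil, List.drop_succ_cons,
          List.drop_zero, List.reverse_nil, List.nil_append]
        rw [ih t acc (by simpa using Nat.le_of_succ_le_succ h)]
        simp
      · have hpre : [x].isPrefixOf (c :: t) = false := by
          simp [List.isPrefixOf]
          exact fun h' => hc h'.symm
        simp only [hpre]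
        rw [if_neg (by simp)]
        rw [ih t (c :: acc) (by simpa using Nat.le_of_succ_le_succ h)]
        simp [hc]

theorem pv_replace_single (l : List Char) (x : Char) :
    PySem.Chars.replace l [x] [] = l.filter (fun c => !(c == x)) := by
  have := pv_go_single x l.length l [] (le_refl _)
  simpa [PySem.Chars.replace] using this

-- replacing every character of S away is filtering by non-membership in S
theorem pv_foldl_replace (S : List Char) : ∀ (l : List Char),
    S.foldl (fun s x => PySem.Chars.replace s [x] []) l
      = l.filter (fun c => !(decide (c ∈ S))) := by
  induction S with
  | nil => intro l; simp
  | cons x S ih =>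
    intro l
    simp only [List.foldl_cons]
    rw [pv_replace_single, ih, List.filter_filter]
    apply List.filter_congr
    intro c _
    by_cases h : c = x <;> simp [h]

-- membership in the set A builds
theorem pv_mem_delete : ∀ (l : List Char) (s0 : PySem.Set Char) (c : Char),
    (c ∈ l.foldl (fun s x => if ¬ PySem.Chars.isdigit x then PySem.Set.add s x else s) s0)
      ↔ (c ∈ s0 ∨ (c ∈ l ∧ PySem.Chars.isdigit c = false)) := by
  intro l
  induction l with
  | nil => intro s0 c; simp
  | cons a t ih =>
    intro s0 c
    simp only [List.foldl_cons]
    by_cases ha : PySem.Chars.isdigit a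
    · rw [if_neg (by simp [ha])]
      rw [ih]
      constructor
      · rintro (h | ⟨h1, h2⟩)
        · exact Or.inl h
        · exact Or.inr ⟨List.mem_cons_of_mem _ h1, h2⟩
      · rintro (h | ⟨h1, h2⟩)
        · exact Or.inl h
        · rcases List.mem_cons.mp h1 with rfl | h1
          · simp [ha] at h2
          · exact Or.inr ⟨h1, h2⟩
    · rw [if_pos (by simp [ha])]
      rw [ih]
      rw [PySem.Set.mem_add]
      constructor
      · rintro (⟨h | rfl⟩ | ⟨h1, h2⟩)
        · exact Or.inl h
        · exact Or.inr ⟨List.mem_cons_self, by simpa using ha⟩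
        · exact Or.inr ⟨List.mem_cons_of_mem _ h1, h2⟩
      · rintro (h | ⟨h1, h2⟩)
        · exact Or.inl (Or.inl h)
        · rcases List.mem_cons.mp h1 with rfl | h1
          · exact Or.inl (Or.inr rfl)
          · exact Or.inr ⟨h1, h2⟩

-- the string-level replace fold, seen through toList
theorem pv_foldl_replace_str (S : List Char) : ∀ (str : String),
    (S.foldl (fun checked x => PySem.Str.replace checked (String.ofList [x]) "") str).toList
      = S.foldl (fun s x => PySem.Chars.replace s [x] []) str.toList := by
  induction S with
  | nil => intro str; simp
  | cons x S ih =>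
    intro str
    simp only [List.foldl_cons]
    rw [ih, PySem.Str.toList_replace]
    rw [String.toList_ofList, show "".toList = [] from rfl]

theorem pv_toList_only_number (check : String) :
    (only_number check).toList = check.toList.filter PySem.Chars.isdigit := by
  unfold only_number
  by_cases h : PySem.Str.strIsdigit check
  · rw [if_neg (by simpa using h)]
    have hall : ∀ c ∈ check.toList, PySem.Chars.isdigit c := by
      rw [PySem.Str.strIsdigit_eq] at h
      intro c hc
      exact List.all_eq_true.mp (Bool.and_elim_right h) c hc
    rw [List.filter_eq_self.mpr (fun c hc => hall c hc)]
  · rw [if_pos (by simpa using h)]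
    rw [pv_foldl_replace_str, pv_foldl_replace]
    apply List.filter_congr
    intro c hc
    have hiff := pv_mem_delete check.toList PySem.Set.empty c
    cases hdig : PySem.Chars.isdigit c
    · have hmem : c ∈ check.toList.foldl
          (fun s x => if ¬ PySem.Chars.isdigit x then PySem.Set.add s x else s)
          PySem.Set.empty := hiff.mpr (Or.inr ⟨hc, hdig⟩)
      rw [Bool.not_eq_false', decide_eq_true_eq]
      exact hmem
    · have hnot : c ∉ check.toList.foldl
          (fun s x => if ¬ PySem.Chars.isdigit x then PySem.Set.add s x else s)
          PySem.Set.empty := by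
        intro hm
        rcases hiff.mp hm with h | ⟨_, h2⟩
        · simp [PySem.Set.empty] at h
        · rw [hdig] at h2; exact absurd h2 (by simp)
      rw [Bool.not_eq_true', decide_eq_false_iff_not]
      exact hnot

-- ===== VERDICT (by name: the statement is the Claim_ definition above) =====
theorem only_number_spec : Claim_equal_only_number := by
  intro check _
  unfold Spec_only_number only_number_alt
  have h := pv_toList_only_number check
  calc only_number check = String.ofList (only_number check).toList := String.ofList_toList.symm
    _ = String.ofList (check.toList.filter PySem.Chars.isdigit) := by rw [h]
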